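-- pv_equiv track=rewrite | github.com/jesopo/ircrobots | examples/factoids.py | _delims
-- ===== SOURCE A (Python) =====
-- def _delims(s: str, delim: str):
--     s_copy = list(s)
--     while s_copy:
--         char = s_copy.pop(0)
--         if char == delim:
--             if not s_copy:
--                 yield len(s)-(len(s_copy)+1)
--             elif not s_copy.pop(0) == delim:
--                 yield len(s)-(len(s_copy)+2)
-- ===== SOURCE B (Python) =====
-- def _delims(s, delim):
--     # run-length scan: a maximal run of delimiter characters yields the index
--     # of its last character iff the run has odd length
--     n = len(s)
--     i = 0
--     while i < n:
--         j = i + 1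
--         while j < n and s[j] == s[i]:
--             j += 1
--         if s[i] == delim and (j - i) % 2 == 1:
--             yield j - 1
--         i = j
-- ===== Notes on version B (the rewrite author's own statement) =====
-- stated objective: faster
-- what changed: Replaced the quadratic pop(0)-driven pairwise consumption with a linear run-length scan that yields the last index of each odd-length maximal run of the delimiter character.
import Mathlib
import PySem

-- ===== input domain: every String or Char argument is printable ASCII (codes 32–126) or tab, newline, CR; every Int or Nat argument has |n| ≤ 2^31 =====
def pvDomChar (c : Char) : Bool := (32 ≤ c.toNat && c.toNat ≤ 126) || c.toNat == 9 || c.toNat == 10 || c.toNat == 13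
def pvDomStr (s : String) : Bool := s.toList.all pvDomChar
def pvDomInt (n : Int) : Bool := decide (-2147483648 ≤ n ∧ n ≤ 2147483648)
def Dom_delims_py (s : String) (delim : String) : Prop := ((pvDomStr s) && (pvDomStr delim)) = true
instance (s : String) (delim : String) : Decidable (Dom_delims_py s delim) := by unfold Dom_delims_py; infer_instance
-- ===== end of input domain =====

-- B replaces A's quadratic pop(0)-driven pairwise consumption by a linear run-length
-- scan: yield the last index of each odd-length maximal run of the delimiter character.

-- ===== PORT A =====
-- A pops chars off the front of a copy of s; yielded indices are len(s) - (len(s_copy)+k).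
def delimsPyAux (n : Int) (delim : String) : List Char → List Int
  | [] => []
  | c :: rest =>
    if String.mk [c] = delim then
      match rest with
      | [] => (n - ((rest.length : Int) + 1)) :: []
      | d :: rest2 =>
        if ¬ (String.mk [d] = delim) then
          (n - ((rest2.length : Int) + 2)) :: delimsPyAux n delim rest2
        else
          delimsPyAux n delim rest2
    else
      delimsPyAux n delim rest

def delims_py (s : String) (delim : String) : List Int :=
  delimsPyAux (s.length : Int) delim s.toList

-- ===== PORT B =====
-- B scans maximal runs of equal characters, carrying the current index i;
-- a run of length L at index i yields j-1 = i+L-1 iff s[i] == delim and L is odd.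
def delimsAltAux (delim : String) (i : Int) : List Char → List Int
  | [] => []
  | c :: rest =>
    let L : Int := 1 + ((rest.takeWhile (fun d => d == c)).length : Int)
    let r := rest.dropWhile (fun d => d == c)
    if String.mk [c] = delim ∧ L % 2 = 1 then
      (i + L - 1) :: delimsAltAux delim (i + L) r
    else
      delimsAltAux delim (i + L) r
termination_by l => l.length
decreasing_by
  all_goals
    simp only [List.length_cons]
    exact Nat.lt_succ_of_le (List.length_dropWhile_le _ _)

def delims_py_alt (s : String) (delim : String) : List Int :=
  delimsAltAux delim 0 s.toList

-- ===== PRECONDITION & SPEC =====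
def Spec_delims_py (s : String) (delim : String) (out : List Int) : Prop := out = delims_py_alt s delim
instance (s : String) (delim : String) (out : List Int) : Decidable (Spec_delims_py s delim out) := by unfold Spec_delims_py; infer_instance

-- ===== CLAIM (what is proved, stated in full; the proofs are below) =====
def Claim_equal_delims_py : Prop := ∀ (s : String) (delim : String), Dom_delims_py s delim → Spec_delims_py s delim (delims_py s delim)

-- ===== LEMMAS AND PROOFS =====

theorem delimsAltAux_congr (delim : String) (x y : Int) (h : x = y) (r : List Char) :
    delimsAltAux delim x r = delimsAltAux delim y r := by rw [h]

-- skipping one leading char that is not the delimiter leaves B's result unchanged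
theorem delimsAltAux_skip_one (delim : String) (i : Int) (c : Char) (rest : List Char)
    (hc : ¬ (String.mk [c] = delim)) :
    delimsAltAux delim i (c :: rest) = delimsAltAux delim (i + 1) rest := by
  cases rest with
  | nil => simp [delimsAltAux, hc]
  | cons d t =>
    by_cases hdc : d = c
    · subst hdc
      rw [delimsAltAux, delimsAltAux]
      simp only [List.takeWhile_cons, List.dropWhile_cons, beq_self_eq_true, if_true,
        List.length_cons, hc, false_and, if_false]
      apply delimsAltAux_congr
      push_cast; ring
    · have hd : (d == c) = false := by simp [hdc]
      rw [delimsAltAux]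
      simp only [List.takeWhile_cons, List.dropWhile_cons, hd,
        hc, false_and, if_false]
      norm_num

-- skipping a doubled leading character leaves B's result unchanged (run parity shifts by 2)
theorem delimsAltAux_skip_two (delim : String) (i : Int) (c : Char) (rest : List Char) :
    delimsAltAux delim i (c :: c :: rest) = delimsAltAux delim (i + 2) rest := by
  cases rest with
  | nil =>
    rw [delimsAltAux, delimsAltAux]
    norm_num [delimsAltAux]
  | cons d t =>
    by_cases hdc : d = c
    · subst hdc
      rw [delimsAltAux, delimsAltAux]
      simp only [List.takeWhile_cons, List.dropWhile_cons, beq_self_eq_true, if_true,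
        List.length_cons]
      push_cast
      generalize ((List.takeWhile (fun x => x == d) t).length : Int) = k
      have hpar : ((1 + (k + 1 + 1)) % 2 = 1) ↔ ((1 + k) % 2 = 1) := by omega
      simp only [hpar]
      split_ifs with h
      · congr 1
        · ring
        · exact delimsAltAux_congr delim _ _ (by ring) _
      · exact delimsAltAux_congr delim _ _ (by ring) _
    · have hd : (d == c) = false := by simp [hdc]
      rw [delimsAltAux, delimsAltAux]
      simp only [List.takeWhile_cons, List.dropWhile_cons, beq_self_eq_true, if_true, hd,
        List.length_cons]
      norm_num
      rw [delimsAltAux]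

-- A's pop-two-at-a-time consumption agrees with B's run scan at index n - |l|
theorem main_lemma (delim : String) (n : Int) :
    ∀ k (l : List Char), l.length ≤ k →
      delimsPyAux n delim l = delimsAltAux delim (n - (l.length : Int)) l := by
  intro k
  induction k with
  | zero =>
    intro l h
    have hl : l = [] := List.eq_nil_of_length_eq_zero (Nat.le_zero.mp h)
    subst hl
    simp [delimsPyAux, delimsAltAux]
  | succ k ih =>
    intro l h
    match l with
    | [] => simp [delimsPyAux, delimsAltAux]
    | c :: rest =>
      by_cases hc : String.mk [c] = delim
      · match rest with
        | [] =>
          simp [delimsPyAux, delimsAltAux, hc]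
        | d :: rest2 =>
          have hlen : rest2.length ≤ k := by simp at h; omega
          by_cases hd : String.mk [d] = delim
          · have hcd : c = d := by
              have h2 : String.ofList [c] = String.ofList [d] := hc.trans hd.symm
              have h3 := congrArg String.toList h2
              simp only [String.toList_ofList] at h3
              simpa using h3
            subst hcd
            rw [delimsPyAux]
            simp only [hc, if_true, hd, not_true, if_neg, if_false]
            rw [delimsAltAux_skip_two]
            rw [ih rest2 hlen]
            exact delimsAltAux_congr delim _ _
              (by simp only [List.length_cons]; push_cast; ring) _
          · have hdc : (d == c) = false := by
              simp only [beq_eq_false_iff_ne, ne_eq]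
              intro hdc; exact hd (hdc ▸ hc)
            simp only [delimsPyAux, hc, if_true, hd, not_false_iff, if_pos]
            rw [delimsAltAux]
            simp only [List.takeWhile_cons, List.dropWhile_cons, hdc,
              List.length_cons, hc, true_and]
            norm_num
            constructor
            · ring
            · rw [delimsAltAux_skip_one delim _ d rest2 hd, ih rest2 hlen]
              exact delimsAltAux_congr delim _ _ (by ring) _
      · rw [delimsPyAux.eq_def]
        simp only [hc, if_false]
        rw [delimsAltAux_skip_one delim _ c rest hc]
        rw [ih rest (by simp at h; omega)]
        exact delimsAltAux_congr delim _ _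
          (by simp only [List.length_cons]; push_cast; ring) _

-- ===== VERDICT (by name: the statement is the Claim_ definition above) =====
theorem delims_py_spec : Claim_equal_delims_py := by
  intro s delim _
  unfold Spec_delims_py delims_py delims_py_alt
  rw [main_lemma delim (s.length : Int) s.toList.length s.toList le_rfl]
  simp [String.length_toList]
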